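-- pv_equiv track=rewrite | github.com/pa-vpap/toy-protocols | C/protocol_c.py | build_past_from_reach
-- ===== SOURCE A (Python) =====
-- from typing import Dict, List, Tuple, Optional
--
-- def build_past_from_reach(N: int, reach: List[int]) -> List[int]:
--     past = [0] * N
--     for i in range(N):
--         x = reach[i]
--         while x:
--             lsb = x & -x
--             j = lsb.bit_length() - 1
--             past[j] |= (1 << i)
--             x ^= lsb
--     return past
-- ===== SOURCE B (Python) =====
-- def build_past_from_reach(N, reach):
--     # Column-major transpose: build each predecessor mask directly by reading
--     # column j of the reach matrix, instead of popping set bits off each row.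
--     return [sum(1 << i for i in range(N) if (reach[i] >> j) & 1)
--             for j in range(N)]
-- ===== Notes on version B (the rewrite author's own statement) =====
-- stated objective: simpler
-- what changed: A pops set bits off each row with x & -x and scatters them into past; B builds each predecessor mask directly as a column-major comprehension summing 1<<i over the rows whose bit j is set.
-- outside the precondition, e.g. on build_past_from_reach(2, [4, 0]): A raises IndexError, B returns [0, 0]; on build_past_from_reach(2, [1]): A raises IndexError, B raises IndexError; on build_past_from_reach(1, [-1]): A raises IndexError, B returns [1]
import Mathlib
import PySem

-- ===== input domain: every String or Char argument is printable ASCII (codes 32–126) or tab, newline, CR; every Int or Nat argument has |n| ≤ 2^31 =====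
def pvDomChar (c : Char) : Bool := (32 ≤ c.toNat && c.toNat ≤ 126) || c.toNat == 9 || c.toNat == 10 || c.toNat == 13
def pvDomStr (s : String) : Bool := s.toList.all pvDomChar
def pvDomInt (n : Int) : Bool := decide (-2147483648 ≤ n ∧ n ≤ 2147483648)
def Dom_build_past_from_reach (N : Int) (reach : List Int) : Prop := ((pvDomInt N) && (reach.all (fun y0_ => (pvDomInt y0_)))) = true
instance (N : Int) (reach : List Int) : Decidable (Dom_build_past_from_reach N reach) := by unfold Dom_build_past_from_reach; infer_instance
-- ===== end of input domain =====

-- B replaces A's row-major lsb-popping loop by a column-major transpose (each output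
-- mask is built directly as a sum over the column's set bits); objective: simpler.

-- ===== PORT A =====
-- the inner `while x:` loop; fuel bounds the iteration count (each pass clears one set
-- bit, so for the nonnegative x admitted by Pre_ a fuel of x.natAbs + 1 is sufficient;
-- negative x, on which Python hits an IndexError, is excluded by Pre_).
def buildPastWhile (fuel : Nat) (i : Nat) (x : Int) (past : List Int) : List Int :=
  match fuel with
  | 0 => past
  | fuel + 1 =>
    if x ≠ 0 then
      let lsb := PySem.Int.band x (-x)                    -- lsb = x & -x
      let j := PySem.Int.bitLength lsb - 1                -- j = lsb.bit_length() - 1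
      -- past[j] |= (1 << i); a j ≥ len(past) is an IndexError in Python (outside Pre_)
      let past' := past.set j (PySem.Int.bor (past.getD j 0) ((1 : Int) <<< i))
      buildPastWhile fuel i (PySem.Int.bxor x lsb) past'  -- x ^= lsb
    else past

def build_past_from_reach (N : Int) (reach : List Int) : List Int :=
  -- past = [0] * N; for i in range(N): … reach[i] …
  -- reach[i] raises IndexError when i ≥ len(reach) (outside Pre_); getD is exact inside Pre_.
  (List.range N.toNat).foldl
    (fun past i => buildPastWhile ((reach.getD i 0).natAbs + 1) i (reach.getD i 0) past)
    (List.replicate N.toNat (0 : Int))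

-- ===== PORT B =====
def build_past_from_reach_alt (N : Int) (reach : List Int) : List Int :=
  -- [sum(1 << i for i in range(N) if (reach[i] >> j) & 1) for j in range(N)]
  (List.range N.toNat).map (fun (j : Nat) =>
    (List.range N.toNat).foldl
      (fun s i => if PySem.Int.band (reach.getD i 0 >>> j) 1 ≠ 0 then s + ((1 : Int) <<< i) else s)
      (0 : Int))

-- ===== PRECONDITION & SPEC =====
-- Pre_ is exactly the set of inputs on which Python A returns: it raises IndexError when
-- N > len(reach), or when some reach[i] (i < N) is negative or has a set bit at position
-- ≥ N (in both cases the bit-popping walk reaches an index past[j] with j ≥ N).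
def Pre_build_past_from_reach (N : Int) (reach : List Int) : Prop :=
  N ≤ (reach.length : Int) ∧ ∀ v ∈ reach.take N.toNat, 0 ≤ v ∧ v < (2 : Int) ^ N.toNat
instance (N : Int) (reach : List Int) : Decidable (Pre_build_past_from_reach N reach) := by
  unfold Pre_build_past_from_reach; infer_instance

def pvWitness_build_past_from_reach : Int × List Int := (2, [2, 1])

def Spec_build_past_from_reach (N : Int) (reach : List Int) (out : List Int) : Prop := out = build_past_from_reach_alt N reach
instance (N : Int) (reach : List Int) (out : List Int) : Decidable (Spec_build_past_from_reach N reach out) := by unfold Spec_build_past_from_reach; infer_instance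

-- ===== CLAIM (what is proved, stated in full; the proofs are below) =====
def Claim_equal_build_past_from_reach : Prop := ∀ (N : Int) (reach : List Int), Dom_build_past_from_reach N reach → Pre_build_past_from_reach N reach → Spec_build_past_from_reach N reach (build_past_from_reach N reach)

-- ===== LEMMAS AND PROOFS =====

-- m & (m-1) clears the lowest set bit
theorem pv_and_pred (m : Nat) (hm : 0 < m) :
    ∃ j, m.testBit j = true ∧ m &&& (m - 1) = m - 2 ^ j := by
  induction m using Nat.strongRecOn with
  | _ m IH =>
  rcases Nat.even_or_odd m with he | ho
  · -- even, m = 2a with a > 0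
    obtain ⟨a, ha⟩ := he
    have ha2 : m = 2 * a := by omega
    have hapos : 0 < a := by omega
    obtain ⟨j, hbit, heq⟩ := IH a (by omega) hapos
    have hle : 2 ^ j ≤ a := Nat.ge_two_pow_of_testBit hbit
    refine ⟨j + 1, ?_, ?_⟩
    · have : m / 2 = a := by omega
      simpa [Nat.testBit_succ, this] using hbit
    · apply Nat.eq_of_testBit_eq
      intro k
      cases k with
      | zero =>
        have h1 : m % 2 = 0 := by omega
        have h2 : (m - 2 ^ (j + 1)) % 2 = 0 := by
          have : m - 2 ^ (j + 1) = 2 * (a - 2 ^ j) := by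
            rw [pow_succ] at *; omega
          omega
        simp [Nat.testBit_and, Nat.testBit_zero, h1, h2]
      | succ k =>
        have hd1 : m / 2 = a := by omega
        have hd2 : (m - 1) / 2 = a - 1 := by omega
        have hd3 : (m - 2 ^ (j + 1)) / 2 = a - 2 ^ j := by
          rw [pow_succ] at *; omega
        have := congrArg (fun x => x.testBit k) heq
        simp only [Nat.testBit_and] at this ⊢
        simp [Nat.testBit_succ, hd1, hd2, hd3, ← Nat.testBit_and, heq]
  · -- odd: m & (m-1) = m - 1
    obtain ⟨a, ha⟩ := ho
    refine ⟨0, by simp [Nat.testBit_zero]; omega, ?_⟩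
    apply Nat.eq_of_testBit_eq
    intro k
    cases k with
    | zero =>
      have h2 : (m - 1) % 2 = 0 := by omega
      simp [Nat.testBit_and, Nat.testBit_zero, h2]
    | succ k =>
      have hd1 : m / 2 = a := by omega
      have hd2 : (m - 1) / 2 = a := by omega
      simp [Nat.testBit_and, Nat.testBit_succ, Nat.and_div_two, hd1, hd2, pow_zero]

-- full description of one pass of the while-loop body at the Nat level
theorem pv_lsb_spec (m : Nat) (hm : 0 < m) :
    ∃ j, m.testBit j = true ∧ m - (m &&& (m - 1)) = 2 ^ j ∧ (m ^^^ 2 ^ j) < m ∧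
      ∀ k, (m ^^^ 2 ^ j).testBit k = (m.testBit k && !(decide (j = k))) := by
  obtain ⟨j, hbit, heq⟩ := pv_and_pred m hm
  have hle : 2 ^ j ≤ m := Nat.ge_two_pow_of_testBit hbit
  have hxorbit : ∀ k, (m ^^^ 2 ^ j).testBit k = (m.testBit k && !(decide (j = k))) := by
    intro k
    by_cases h : j = k
    · subst h; simp [Nat.testBit_xor, Nat.testBit_two_pow, hbit]
    · simp [Nat.testBit_xor, Nat.testBit_two_pow, h]
  refine ⟨j, hbit, by rw [heq]; exact Nat.sub_sub_self hle, ?_, hxorbit⟩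
  apply Nat.lt_of_testBit j
  · simp [hxorbit]
  · exact hbit
  · intro k hk
    have : j ≠ k := by omega
    simp [hxorbit, this]

-- Python's bit_length of 2^j is j+1
theorem pv_bitLength_two_pow (j : Nat) :
    PySem.Int.bitLength ((2 ^ j : Nat) : Int) = j + 1 := by
  set b := PySem.Int.bitLength ((2 ^ j : Nat) : Int) with hb
  have h1 : (((2 ^ j : Nat) : Int)).natAbs < 2 ^ b := PySem.Int.lt_two_pow_bitLength _
  have h2 : 2 ^ (b - 1) ≤ (((2 ^ j : Nat) : Int)).natAbs :=
    PySem.Int.two_pow_bitLength_le _ (by positivity)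
  simp only [Int.natAbs_natCast] at h1 h2
  have hj : j < b := (Nat.pow_lt_pow_iff_right (by omega)).mp h1
  have hb1 : b - 1 ≤ j := (Nat.pow_le_pow_iff_right (by omega)).mp h2
  omega

-- (1 : Int) <<< i = ↑(2 ^ i)
theorem pv_one_shl (i : Nat) : ((1 : Int) <<< i) = ((2 ^ i : Nat) : Int) := by
  change Int.shiftLeft 1 i = _
  simp [Int.shiftLeft, Nat.shiftLeft_eq]

-- the B-side condition reads bit j
theorem pv_cond_eq (m j : Nat) :
    (PySem.Int.band (((m : Nat) : Int) >>> j) 1 ≠ 0) ↔ m.testBit j = true := by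
  have hsh : (((m : Nat) : Int) >>> j) = ((m >>> j : Nat) : Int) := by
    change Int.shiftRight _ _ = _
    simp [Int.shiftRight]
  rw [hsh, show (1 : Int) = ((1 : Nat) : Int) from rfl, PySem.Int.band_natCast]
  rw [Nat.and_one_is_mod, Nat.testBit_eq_decide_div_mod_eq, ← Nat.shiftRight_eq_div_pow]
  rcases Nat.mod_two_eq_zero_or_one (m >>> j) with h | h <;> simp [h]

theorem pv_mapIdx_if_zero (i : Nat) (past : List Int) :
    past.mapIdx (fun j p => if (0 : Nat).testBit j then PySem.Int.bor p ((1 : Int) <<< i) else p) = past := by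
  apply List.ext_getElem (by simp)
  intro k h1 h2
  simp [Nat.zero_testBit]

-- one full run of the while loop ORs 1<<i into every position of `past` whose bit is set in m
theorem pv_while_eq (i : Nat) : ∀ (fuel : Nat) (m : Nat) (past : List Int), m ≤ fuel →
    buildPastWhile fuel i ((m : Nat) : Int) past =
      past.mapIdx (fun j p => if m.testBit j then PySem.Int.bor p ((1 : Int) <<< i) else p) := by
  intro fuel
  induction fuel with
  | zero =>
    intro m past hm
    have : m = 0 := by omega
    subst this
    rw [pv_mapIdx_if_zero]
    rfl
  | succ f IH =>
    intro m past hm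
    rcases Nat.eq_zero_or_pos m with h0 | hpos
    · subst h0
      rw [pv_mapIdx_if_zero]
      simp [buildPastWhile]
    · obtain ⟨j, hbit, hlsb, hlt, hxorbit⟩ := pv_lsb_spec m hpos
      have hne : ((m : Nat) : Int) ≠ 0 := by
        simp; omega
      have hband : PySem.Int.band ((m : Nat) : Int) (-((m : Nat) : Int)) = ((2 ^ j : Nat) : Int) := by
        rw [PySem.Int.band]
        have h1 : (0 : Int) ≤ ((m : Nat) : Int) := by positivity
        have h2 : ¬ (0 : Int) ≤ -((m : Nat) : Int) := by simp; omega
        simp only [h1, if_pos, h2, if_neg, if_false]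
        have h3 : (-(-((m : Nat) : Int)) - 1).toNat = m - 1 := by omega
        have h4 : (((m : Nat) : Int)).toNat = m := by omega
        rw [h3, h4]
        exact congrArg _ (by omega)
      have hxor : PySem.Int.bxor ((m : Nat) : Int) (((2 ^ j : Nat) : Int)) = ((m ^^^ 2 ^ j : Nat) : Int) :=
        PySem.Int.bxor_natCast _ _
      simp only [buildPastWhile, hne, if_pos, hband, hxor, ne_eq, not_false_eq_true, if_true,
        pv_bitLength_two_pow, Nat.add_sub_cancel]
      rw [IH (m ^^^ 2 ^ j) _ (by omega)]
      apply List.ext_getElem (by simp)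
      intro k h1 h2
      simp only [List.getElem_mapIdx, hxorbit, List.getElem_set]
      by_cases hk : j = k
      · subst hk
        have hjlen : j < past.length := by simpa using h1
        simp [hbit, List.getD_eq_getElem?_getD, List.getElem?_eq_getElem hjlen]
      · simp [hk]

-- ===== the outer loop: A builds row-major what B builds column-major =====

-- the OR-accumulated column j after the first k outer iterations
def pvOrCol (reach : List Int) (j k : Nat) : Int :=
  (List.range k).foldl
    (fun s i => if (reach.getD i 0).toNat.testBit j then PySem.Int.bor s ((1 : Int) <<< i) else s)
    (0 : Int)

theorem pv_outer (reach : List Int) (n : Nat) (h : ∀ i, i < n → 0 ≤ reach.getD i 0) :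
    ∀ k, k ≤ n →
      (List.range k).foldl
        (fun past i => buildPastWhile ((reach.getD i 0).natAbs + 1) i (reach.getD i 0) past)
        (List.replicate n (0 : Int)) =
      (List.range n).map (fun j => pvOrCol reach j k) := by
  intro k
  induction k with
  | zero =>
    intro _
    apply List.ext_getElem (by simp)
    intro kk h1 h2
    simp [pvOrCol]
  | succ k IH =>
    intro hk
    rw [List.range_succ, List.foldl_append, IH (by omega), List.foldl_cons, List.foldl_nil]
    have hx : 0 ≤ reach.getD k 0 := h k (by omega)
    obtain ⟨m, hcast⟩ : ∃ m : Nat, reach.getD k 0 = ((m : Nat) : Int) :=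
      ⟨_, (Int.toNat_of_nonneg hx).symm⟩
    rw [hcast, show ((m : Nat) : Int).natAbs + 1 = m + 1 by simp,
      pv_while_eq k (m + 1) m _ (by omega)]
    apply List.ext_getElem (by simp)
    intro kk h1 h2
    simp only [List.getElem_mapIdx, List.getElem_map, List.getElem_range]
    conv_rhs => rw [pvOrCol, List.range_succ, List.foldl_append, List.foldl_cons, List.foldl_nil]
    rw [← pvOrCol, hcast, Int.toNat_natCast]

-- each OR-column equals B's sum-column (the ORed powers 2^i are pairwise disjoint)
theorem pv_col (reach : List Int) (j : Nat) :
    ∀ k, (∀ i, i < k → 0 ≤ reach.getD i 0) →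
      ∃ c : Nat, c < 2 ^ k ∧ pvOrCol reach j k = ((c : Nat) : Int) ∧
        (List.range k).foldl
          (fun s i => if PySem.Int.band (reach.getD i 0 >>> j) 1 ≠ 0 then s + ((1 : Int) <<< i) else s)
          (0 : Int) = ((c : Nat) : Int) := by
  intro k
  induction k with
  | zero => exact fun _ => ⟨0, by simp [pvOrCol]⟩
  | succ k IH =>
    intro h
    obtain ⟨c, hc, hor, hsum⟩ := IH (fun i hi => h i (by omega))
    have hx : 0 ≤ reach.getD k 0 := h k (by omega)
    obtain ⟨m, hcast⟩ : ∃ m : Nat, reach.getD k 0 = ((m : Nat) : Int) :=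
      ⟨_, (Int.toNat_of_nonneg hx).symm⟩
    by_cases hbit : m.testBit j
    · refine ⟨c + 2 ^ k, by rw [pow_succ]; omega, ?_, ?_⟩
      · rw [pvOrCol, List.range_succ, List.foldl_append, ← pvOrCol, hor, List.foldl_cons,
          List.foldl_nil, hcast, Int.toNat_natCast, if_pos hbit, pv_one_shl,
          PySem.Int.bor_natCast, Nat.or_comm,
          show (2 ^ k ||| c) = c + 2 ^ k by
            have h2 := Nat.two_pow_add_eq_or_of_lt hc 1
            simp only [Nat.mul_one] at h2
            omega]
      · rw [List.range_succ, List.foldl_append, hsum, List.foldl_cons, List.foldl_nil, hcast,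
          if_pos ((pv_cond_eq m j).mpr hbit), pv_one_shl]
        push_cast; ring
    · refine ⟨c, by rw [pow_succ]; omega, ?_, ?_⟩
      · rw [pvOrCol, List.range_succ, List.foldl_append, ← pvOrCol, hor, List.foldl_cons,
          List.foldl_nil, hcast, Int.toNat_natCast, if_neg hbit]
      · have hcond : ¬ (PySem.Int.band (((m : Nat) : Int) >>> j) 1 ≠ 0) := by
          rw [pv_cond_eq]; simpa using hbit
        rw [List.range_succ, List.foldl_append, hsum, List.foldl_cons, List.foldl_nil, hcast,
          if_neg hcond]

-- ===== VERDICT (by name: the statement is the Claim_ definition above) =====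
theorem build_past_from_reach_spec : Claim_equal_build_past_from_reach := by
  intro N reach _ hpre
  obtain ⟨hlen, hvals⟩ := hpre
  unfold Spec_build_past_from_reach build_past_from_reach build_past_from_reach_alt
  have hn : N.toNat ≤ reach.length := by omega
  have hnn : ∀ i, i < N.toNat → 0 ≤ reach.getD i 0 := by
    intro i hi
    have hig : i < reach.length := by omega
    have : reach.getD i 0 = reach[i] := List.getD_eq_getElem _ _ hig
    rw [this]
    exact (hvals reach[i] (by rw [List.mem_take_iff_getElem]; exact ⟨i, by omega, rfl⟩)).1
  rw [pv_outer reach N.toNat hnn N.toNat (le_refl _)]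
  apply List.map_congr_left
  intro j _
  obtain ⟨c, _, hor, hsum⟩ := pv_col reach j N.toNat hnn
  rw [hor, hsum]
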